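-- pv_equiv track=rewrite | github.com/michalicekmilan/adventofcode2017 | 21/code.py | join_grid
-- ===== SOURCE A (Python) =====
-- import math
--
-- def join_grid(g):
-- 	k = int(math.sqrt(len(g)))
-- 	l = len(g[0])
-- 	joined = [[0 for x in range(k*l)] for y in range(k*l)]
-- 	for i in range(k):
-- 		for j in range(k):
-- 			for r in range(l):
-- 				for c in range(l):
-- 					joined[(i*l)+r][(j*l)+c] = g[i*k+j][r][c]
-- 	return joined
-- ===== SOURCE B (Python) =====
-- import math
--
-- def join_grid(g):
--     k = int(math.sqrt(len(g)))
--     l = len(g[0])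
--     rows = []
--     for i in range(k):
--         for r in range(l):
--             row = []
--             for j in range(k):
--                 row += g[i*k+j][r][:l]
--             rows.append(row)
--     return rows
-- ===== Notes on version B (the rewrite author's own statement) =====
-- stated objective: simpler
-- what changed: B builds the output row by row as concatenations of the blocks' row slices, instead of preallocating a zero matrix and writing every cell by a quadruple-nested indexed assignment; bulk slicing/concatenation also makes it measurably faster by a constant factor.
import Mathlib
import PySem

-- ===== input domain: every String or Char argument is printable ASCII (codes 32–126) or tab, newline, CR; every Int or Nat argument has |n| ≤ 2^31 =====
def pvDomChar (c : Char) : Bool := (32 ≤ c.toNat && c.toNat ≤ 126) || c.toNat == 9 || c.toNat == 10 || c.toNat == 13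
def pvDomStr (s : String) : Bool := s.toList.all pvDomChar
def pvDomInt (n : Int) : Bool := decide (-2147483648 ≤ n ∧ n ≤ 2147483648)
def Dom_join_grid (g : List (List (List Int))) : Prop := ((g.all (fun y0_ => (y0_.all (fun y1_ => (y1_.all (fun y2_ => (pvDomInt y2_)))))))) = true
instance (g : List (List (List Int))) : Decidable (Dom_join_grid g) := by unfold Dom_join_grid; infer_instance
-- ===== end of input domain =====

-- B builds the output row by row by concatenating the blocks' row slices instead of
-- preallocating a zero matrix and writing each cell by indexed assignment (objective: simpler).

-- ===== PORT A =====
-- int(math.sqrt(n)) for a list length: the largest k with k*k <= n (exact, kernel-computable)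
def pvSqrt (n : Nat) : Nat := (List.range (n+1)).foldl (fun acc k => if k*k ≤ n then k else acc) 0

-- joined[a][b] = v  (Python's indexed assignment; in-range on every admitted input)
def pvSet2 (m : List (List Int)) (a b : Nat) (v : Int) : List (List Int) :=
  m.set a ((m.getD a []).set b v)

def join_grid (g : List (List (List Int))) : List (List Int) :=
  let k := pvSqrt g.length
  let l := (g.headD []).length
  let joined := (List.range (k*l)).map (fun _ => (List.range (k*l)).map (fun _ => (0:Int)))
  (List.range k).foldl (fun m i =>
    (List.range k).foldl (fun m j =>
      (List.range l).foldl (fun m r =>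
        (List.range l).foldl (fun m c =>
          pvSet2 m (i*l+r) (j*l+c) (((g.getD (i*k+j) []).getD r []).getD c 0)) m) m) m) joined

-- ===== PORT B =====
def join_grid_alt (g : List (List (List Int))) : List (List Int) :=
  let k := pvSqrt g.length
  let l := (g.headD []).length
  (List.range k).foldl (fun rows i =>
    (List.range l).foldl (fun rows r =>
      rows ++ [(List.range k).foldl (fun row j =>
        row ++ ((g.getD (i*k+j) []).getD r []).take l) []]) rows) []

-- ===== PRECONDITION & SPEC =====
-- Pre_ is exactly A's no-raise set: g nonempty, and each of the k*k used blocks has at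
-- least l rows whose first l rows each have length at least l (A indexes g[m][r][c] for r,c < l).
def Pre_join_grid (g : List (List (List Int))) : Prop :=
  g ≠ [] ∧
  ∀ m < pvSqrt g.length * pvSqrt g.length,
    (g.headD []).length ≤ (g.getD m []).length ∧
    ∀ r < (g.headD []).length, (g.headD []).length ≤ ((g.getD m []).getD r []).length
instance (g : List (List (List Int))) : Decidable (Pre_join_grid g) := by
  unfold Pre_join_grid; infer_instance

def pvWitness_join_grid : List (List (List Int)) :=
  [[[1,2],[3,4]], [[5,6],[7,8]], [[9,10],[11,12]], [[13,14],[15,16]]]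

def Spec_join_grid (g : List (List (List Int))) (out : List (List Int)) : Prop := out = join_grid_alt g
instance (g : List (List (List Int))) (out : List (List Int)) : Decidable (Spec_join_grid g out) := by unfold Spec_join_grid; infer_instance

-- ===== CLAIM (what is proved, stated in full; the proofs are below) =====
def Claim_equal_join_grid : Prop := ∀ (g : List (List (List Int))), Dom_join_grid g → Pre_join_grid g → Spec_join_grid g (join_grid g)

-- ===== LEMMAS AND PROOFS =====

-- the (R,C) entry of a matrix, and the invariant "all rows have length n"
def pvGet2 (m : List (List Int)) (R C : Nat) : Int := (m.getD R []).getD C 0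
def pvDims (n : Nat) (m : List (List Int)) : Prop := ∀ row ∈ m, row.length = n

-- A's four nested loops, named so we can induct on each range bound
def pvFoldC (g : List (List (List Int))) (K L i j r n : Nat) (m : List (List Int)) : List (List Int) :=
  (List.range n).foldl (fun m c => pvSet2 m (i*L+r) (j*L+c) (((g.getD (i*K+j) []).getD r []).getD c 0)) m
def pvFoldR (g : List (List (List Int))) (K L i j n : Nat) (m : List (List Int)) : List (List Int) :=
  (List.range n).foldl (fun m r => pvFoldC g K L i j r L m) m
def pvFoldJ (g : List (List (List Int))) (K L i n : Nat) (m : List (List Int)) : List (List Int) :=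
  (List.range n).foldl (fun m j => pvFoldR g K L i j L m) m
def pvFoldI (g : List (List (List Int))) (K L n : Nat) (m : List (List Int)) : List (List Int) :=
  (List.range n).foldl (fun m i => pvFoldJ g K L i K m) m

lemma join_grid_eq_fold (g : List (List (List Int))) :
    join_grid g = pvFoldI g (pvSqrt g.length) ((g.headD []).length) (pvSqrt g.length)
      ((List.range (pvSqrt g.length * (g.headD []).length)).map
        (fun _ => (List.range (pvSqrt g.length * (g.headD []).length)).map (fun _ => (0:Int)))) := rfl

lemma pvP_set2 {n : Nat} {m : List (List Int)} (h : m.length = n ∧ pvDims n m) (a b : Nat) (v : Int) :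
    (pvSet2 m a b v).length = n ∧ pvDims n (pvSet2 m a b v) := by
  obtain ⟨h1, h2⟩ := h
  by_cases ha : a < m.length
  · refine ⟨by simpa [pvSet2], ?_⟩
    intro row hrow
    rcases List.mem_or_eq_of_mem_set hrow with hr | hr
    · exact h2 _ hr
    · subst hr
      rw [List.length_set, List.getD_eq_getElem m [] ha]
      exact h2 _ (List.getElem_mem ha)
  · have : pvSet2 m a b v = m := by
      unfold pvSet2; exact List.set_eq_of_length_le (by omega)
    rw [this]; exact ⟨h1, h2⟩

lemma pvFoldP {α : Type} (f : List (List Int) → α → List (List Int)) (P : List (List Int) → Prop)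
    (hf : ∀ m x, P m → P (f m x)) (xs : List α) (m : List (List Int)) (h : P m) :
    P (xs.foldl f m) := by
  induction xs generalizing m with
  | nil => exact h
  | cons x xs ih => exact ih _ (hf _ _ h)

lemma pvFoldC_P (g : List (List (List Int))) (K L i j r n : Nat) {N : Nat} {m : List (List Int)}
    (h : m.length = N ∧ pvDims N m) :
    (pvFoldC g K L i j r n m).length = N ∧ pvDims N (pvFoldC g K L i j r n m) :=
  pvFoldP _ (fun m => m.length = N ∧ pvDims N m) (fun m c h => pvP_set2 h _ _ _) _ m h

lemma pvFoldR_P (g : List (List (List Int))) (K L i j n : Nat) {N : Nat} {m : List (List Int)}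
    (h : m.length = N ∧ pvDims N m) :
    (pvFoldR g K L i j n m).length = N ∧ pvDims N (pvFoldR g K L i j n m) :=
  pvFoldP _ (fun m => m.length = N ∧ pvDims N m) (fun m r h => pvFoldC_P g K L i j r L h) _ m h

lemma pvFoldJ_P (g : List (List (List Int))) (K L i n : Nat) {N : Nat} {m : List (List Int)}
    (h : m.length = N ∧ pvDims N m) :
    (pvFoldJ g K L i n m).length = N ∧ pvDims N (pvFoldJ g K L i n m) :=
  pvFoldP _ (fun m => m.length = N ∧ pvDims N m) (fun m j h => pvFoldR_P g K L i j L h) _ m h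

lemma pvFoldI_P (g : List (List (List Int))) (K L n : Nat) {N : Nat} {m : List (List Int)}
    (h : m.length = N ∧ pvDims N m) :
    (pvFoldI g K L n m).length = N ∧ pvDims N (pvFoldI g K L n m) :=
  pvFoldP _ (fun m => m.length = N ∧ pvDims N m) (fun m i h => pvFoldJ_P g K L i K h) _ m h

lemma pvGet2_set2 {m : List (List Int)} {a b : Nat} (ha : a < m.length)
    (hb : b < (m.getD a []).length) (w : Int) (R C : Nat) :
    pvGet2 (pvSet2 m a b w) R C = if R = a ∧ C = b then w else pvGet2 m R C := by
  unfold pvGet2 pvSet2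
  by_cases hR : R = a
  · subst hR
    have hrow : (m.set R ((m.getD R []).set b w)).getD R [] = (m.getD R []).set b w := by
      rw [List.getD_eq_getElem _ [] (by simpa using ha)]
      exact List.getElem_set_self (h := by simpa using ha)
    rw [hrow]
    by_cases hC : C = b
    · subst hC
      rw [List.getD_eq_getElem _ 0 (by simpa using hb), if_pos ⟨rfl, rfl⟩]
      exact List.getElem_set_self (h := by simpa using hb)
    · rw [if_neg (by tauto), List.getD_eq_getElem?_getD, List.getD_eq_getElem?_getD,
        List.getElem?_set_ne (by omega)]
      simp [List.getD_eq_getElem?_getD]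
  · rw [if_neg (by tauto)]
    have : (m.set a ((m.getD a []).set b w)).getD R [] = m.getD R [] := by
      rw [List.getD_eq_getElem?_getD, List.getD_eq_getElem?_getD,
        List.getElem?_set_ne (by omega)]
      simp [List.getD_eq_getElem?_getD]
    rw [this]

lemma pvFoldC_get2 (g : List (List (List Int))) (K L i j r : Nat) (hi : i < K) (hj : j < K)
    (hr : r < L) (n : Nat) (hn : n ≤ L) (m : List (List Int))
    (hm : m.length = K*L ∧ pvDims (K*L) m) (R C : Nat) :
    pvGet2 (pvFoldC g K L i j r n m) R C =
      if R = i*L+r ∧ j*L ≤ C ∧ C < j*L+n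
      then ((g.getD (i*K+j) []).getD r []).getD (C - (j*L)) 0
      else pvGet2 m R C := by
  induction n with
  | zero =>
    rw [if_neg (by omega)]; rfl
  | succ n ih =>
    have hrow : i*L + r < K*L := by
      have h1 : (i+1)*L ≤ K*L := Nat.mul_le_mul_right L hi
      have h2 : i*L + L = (i+1)*L := by ring
      omega
    have hcol : j*L + n < K*L := by
      have h1 : (j+1)*L ≤ K*L := Nat.mul_le_mul_right L hj
      have h2 : j*L + L = (j+1)*L := by ring
      omega
    have hP := pvFoldC_P g K L i j r n hm
    have hstep : pvFoldC g K L i j r (n+1) m =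
        pvSet2 (pvFoldC g K L i j r n m) (i*L+r) (j*L+n) (((g.getD (i*K+j) []).getD r []).getD n 0) := by
      unfold pvFoldC
      rw [List.range_succ, List.foldl_append, List.foldl_cons, List.foldl_nil]
    have hlenrow : j*L + n < ((pvFoldC g K L i j r n m).getD (i*L+r) []).length := by
      rw [List.getD_eq_getElem _ [] (by omega), hP.2 _ (List.getElem_mem (by omega))]
      exact hcol
    rw [hstep, pvGet2_set2 (by omega) hlenrow, ih (by omega)]
    by_cases h1 : R = i*L+r ∧ C = j*L+n
    · rw [if_pos h1, if_pos (by omega)]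
      have : C - j*L = n := by omega
      rw [this]
    · rw [if_neg h1]
      by_cases h2 : R = i*L+r ∧ j*L ≤ C ∧ C < j*L+n
      · rw [if_pos h2, if_pos (by omega)]
      · rw [if_neg h2, if_neg (by omega)]

lemma pvFoldR_get2 (g : List (List (List Int))) (K L i j : Nat) (hi : i < K) (hj : j < K)
    (n : Nat) (hn : n ≤ L) (m : List (List Int))
    (hm : m.length = K*L ∧ pvDims (K*L) m) (R C : Nat) :
    pvGet2 (pvFoldR g K L i j n m) R C =
      if i*L ≤ R ∧ R < i*L+n ∧ j*L ≤ C ∧ C < j*L+L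
      then ((g.getD (i*K+j) []).getD (R - (i*L)) []).getD (C - (j*L)) 0
      else pvGet2 m R C := by
  induction n with
  | zero =>
    rw [if_neg (by omega)]; rfl
  | succ n ih =>
    have hP := pvFoldR_P g K L i j n hm
    have hstep : pvFoldR g K L i j (n+1) m = pvFoldC g K L i j n L (pvFoldR g K L i j n m) := by
      unfold pvFoldR
      rw [List.range_succ, List.foldl_append, List.foldl_cons, List.foldl_nil]
    rw [hstep, pvFoldC_get2 g K L i j n hi hj (by omega) L (le_refl L) _ hP, ih (by omega)]
    by_cases h1 : R = i*L+n ∧ j*L ≤ C ∧ C < j*L+L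
    · rw [if_pos h1, if_pos (by omega)]
      have : R - i*L = n := by omega
      rw [this]
    · rw [if_neg h1]
      by_cases h2 : i*L ≤ R ∧ R < i*L+n ∧ j*L ≤ C ∧ C < j*L+L
      · rw [if_pos h2, if_pos (by omega)]
      · rw [if_neg h2, if_neg (by omega)]

lemma pvFoldJ_get2 (g : List (List (List Int))) (K L i : Nat) (hi : i < K)
    (n : Nat) (hn : n ≤ K) (m : List (List Int))
    (hm : m.length = K*L ∧ pvDims (K*L) m) (R C : Nat) :
    pvGet2 (pvFoldJ g K L i n m) R C =
      if i*L ≤ R ∧ R < i*L+L ∧ C < n*L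
      then ((g.getD (i*K + C/L) []).getD (R - (i*L)) []).getD (C % L) 0
      else pvGet2 m R C := by
  induction n with
  | zero =>
    rw [if_neg (by omega)]; rfl
  | succ n ih =>
    have hP := pvFoldJ_P g K L i n hm
    have hstep : pvFoldJ g K L i (n+1) m = pvFoldR g K L i n L (pvFoldJ g K L i n m) := by
      unfold pvFoldJ
      rw [List.range_succ, List.foldl_append, List.foldl_cons, List.foldl_nil]
    rw [hstep, pvFoldR_get2 g K L i n hi (by omega) L (le_refl L) _ hP, ih (by omega)]
    have hmul : (n+1)*L = n*L + L := by ring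
    by_cases h1 : i*L ≤ R ∧ R < i*L+L ∧ n*L ≤ C ∧ C < n*L+L
    · rw [if_pos h1, if_pos (by omega)]
      have hdiv : C / L = n := Nat.div_eq_of_lt_le h1.2.2.1 (by omega)
      have hmod : C % L = C - n*L := by
        have h3 := Nat.div_add_mod C L
        rw [hdiv] at h3
        have h4 : L * n = n * L := Nat.mul_comm L n
        omega
      rw [hdiv, hmod]
    · rw [if_neg h1]
      by_cases h2 : i*L ≤ R ∧ R < i*L+L ∧ C < n*L
      · rw [if_pos h2, if_pos (by omega)]
      · rw [if_neg h2, if_neg (by omega)]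

lemma pvFoldI_get2 (g : List (List (List Int))) (K L : Nat)
    (n : Nat) (hn : n ≤ K) (m : List (List Int))
    (hm : m.length = K*L ∧ pvDims (K*L) m) (R C : Nat) :
    pvGet2 (pvFoldI g K L n m) R C =
      if R < n*L ∧ C < K*L
      then ((g.getD ((R/L)*K + C/L) []).getD (R % L) []).getD (C % L) 0
      else pvGet2 m R C := by
  induction n with
  | zero =>
    rw [if_neg (by omega)]; rfl
  | succ n ih =>
    have hP := pvFoldI_P g K L n hm
    have hstep : pvFoldI g K L (n+1) m = pvFoldJ g K L n K (pvFoldI g K L n m) := by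
      unfold pvFoldI
      rw [List.range_succ, List.foldl_append, List.foldl_cons, List.foldl_nil]
    rw [hstep, pvFoldJ_get2 g K L n (by omega) K (le_refl K) _ hP, ih (by omega)]
    have hmul : (n+1)*L = n*L + L := by ring
    by_cases h1 : n*L ≤ R ∧ R < n*L+L ∧ C < K*L
    · rw [if_pos h1, if_pos (by omega)]
      have hdiv : R / L = n := Nat.div_eq_of_lt_le h1.1 (by omega)
      have hmod : R % L = R - n*L := by
        have h3 := Nat.div_add_mod R L
        rw [hdiv] at h3
        have h4 : L * n = n * L := Nat.mul_comm L n
        omega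
      rw [hdiv, hmod]
    · rw [if_neg h1]
      by_cases h2 : R < n*L ∧ C < K*L
      · rw [if_pos h2, if_pos (by omega)]
      · rw [if_neg h2, if_neg (by omega)]

-- generic: a left fold that appends per element is a flatMap
lemma pvFoldl_append {α β : Type} (F : List β → α → List β) (f : α → List β)
    (hF : ∀ acc x, F acc x = acc ++ f x) (xs : List α) (a : List β) :
    xs.foldl F a = a ++ xs.flatMap f := by
  induction xs generalizing a with
  | nil => simp
  | cons x xs ih => rw [List.foldl_cons, ih, hF, List.flatMap_cons, List.append_assoc]

lemma pvFlatMap_congr {α β : Type} {xs : List α} {f h : α → List β}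
    (hfg : ∀ x ∈ xs, f x = h x) : xs.flatMap f = xs.flatMap h := by
  induction xs with
  | nil => rfl
  | cons x xs ih =>
    rw [List.flatMap_cons, List.flatMap_cons, hfg x (by simp), ih (fun y hy => hfg y (by simp [hy]))]

lemma pvRange_mul_map {β : Type} (K L : Nat) (h : Nat → β) :
    (List.range (K*L)).map h = (List.range K).flatMap (fun i => (List.range L).map (fun r => h (i*L+r))) := by
  induction K with
  | zero => simp
  | succ K ih =>
    have hmul : (K+1)*L = K*L + L := by ring
    rw [hmul, List.range_add, List.map_append, ih, List.range_succ, List.flatMap_append,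
      List.flatMap_cons, List.flatMap_nil, List.map_map]
    simp [Function.comp]

lemma pvTake_eq_map_getD (xs : List Int) (L : Nat) (h : L ≤ xs.length) :
    xs.take L = (List.range L).map (fun c => xs.getD c 0) := by
  apply List.ext_getElem
  · simp [h]
  · intro n h1 h2
    simp only [List.getElem_take, List.getElem_map, List.getElem_range]
    have hn : n < L := by simpa using h2
    rw [List.getD_eq_getElem xs 0 (by omega)]

-- A's fold equals the canonical entrywise matrix
lemma pvA_eq_bigM (g : List (List (List Int))) (K L : Nat) :
    pvFoldI g K L K ((List.range (K*L)).map (fun _ => (List.range (K*L)).map (fun _ => (0:Int)))) =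
    (List.range (K*L)).map (fun R => (List.range (K*L)).map (fun C =>
      ((g.getD ((R/L)*K + C/L) []).getD (R % L) []).getD (C % L) 0)) := by
  have hM0 : ((List.range (K*L)).map (fun _ => (List.range (K*L)).map (fun _ => (0:Int)))).length = K*L ∧
      pvDims (K*L) ((List.range (K*L)).map (fun _ => (List.range (K*L)).map (fun _ => (0:Int)))) := by
    refine ⟨by simp, ?_⟩
    intro row hrow
    rw [List.mem_map] at hrow
    obtain ⟨a, _, ha⟩ := hrow
    rw [← ha]; simp
  have hP := pvFoldI_P g K L K hM0
  apply List.ext_getElem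
  · rw [hP.1]; simp
  · intro R h1 h2
    have hR : R < K*L := by rw [hP.1] at h1; exact h1
    simp only [List.getElem_map, List.getElem_range]
    apply List.ext_getElem
    · rw [hP.2 _ (List.getElem_mem h1)]; simp
    · intro C h3 h4
      have hC : C < K*L := by rw [hP.2 _ (List.getElem_mem h1)] at h3; exact h3
      simp only [List.getElem_map, List.getElem_range]
      have hE := pvFoldI_get2 g K L K (le_refl K) _ hM0 R C
      rw [if_pos ⟨hR, hC⟩] at hE
      unfold pvGet2 at hE
      rw [List.getD_eq_getElem _ [] h1, List.getD_eq_getElem _ 0 h3] at hE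
      exact hE

-- the canonical matrix in block form
lemma pvBigM_eq_T (g : List (List (List Int))) (K L : Nat) :
    (List.range (K*L)).map (fun R => (List.range (K*L)).map (fun C =>
      ((g.getD ((R/L)*K + C/L) []).getD (R % L) []).getD (C % L) 0)) =
    (List.range K).flatMap (fun i => (List.range L).map (fun r =>
      (List.range K).flatMap (fun j => (List.range L).map (fun c =>
        ((g.getD (i*K+j) []).getD r []).getD c 0)))) := by
  rw [pvRange_mul_map K L (fun R => (List.range (K*L)).map (fun C =>
      ((g.getD ((R/L)*K + C/L) []).getD (R % L) []).getD (C % L) 0))]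
  apply pvFlatMap_congr
  intro i hi
  rw [List.mem_range] at hi
  apply List.map_congr_left
  intro r hr
  rw [List.mem_range] at hr
  have hdiv : (i*L+r)/L = i := Nat.div_eq_of_lt_le (by omega)
    (by have h5 : (i+1)*L = i*L+L := Nat.succ_mul i L; omega)
  have hmod : (i*L+r)%L = r := by
    have h3 := Nat.div_add_mod (i*L+r) L
    rw [hdiv] at h3
    have h4 : L * i = i * L := Nat.mul_comm L i
    omega
  simp only [hdiv, hmod]
  rw [pvRange_mul_map K L (fun C =>
      ((g.getD (i*K + C/L) []).getD r []).getD (C % L) 0)]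
  apply pvFlatMap_congr
  intro j hj
  rw [List.mem_range] at hj
  apply List.map_congr_left
  intro c hc
  rw [List.mem_range] at hc
  have hdiv2 : (j*L+c)/L = j := Nat.div_eq_of_lt_le (by omega)
    (by have h5 : (j+1)*L = j*L+L := Nat.succ_mul j L; omega)
  have hmod2 : (j*L+c)%L = c := by
    have h3 := Nat.div_add_mod (j*L+c) L
    rw [hdiv2] at h3
    have h4 : L * j = j * L := Nat.mul_comm L j
    omega
  rw [hdiv2, hmod2]

-- B's fold equals the same block form (uses the Pre_ row-length bound)
lemma pvB_eq_T (g : List (List (List Int))) (K L : Nat)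
    (hpre : ∀ m, m < K*K → ∀ r, r < L → L ≤ ((g.getD m []).getD r []).length) :
    (List.range K).foldl (fun rows i =>
      (List.range L).foldl (fun rows r =>
        rows ++ [(List.range K).foldl (fun row j =>
          row ++ ((g.getD (i*K+j) []).getD r []).take L) []]) rows) [] =
    (List.range K).flatMap (fun i => (List.range L).map (fun r =>
      (List.range K).flatMap (fun j => (List.range L).map (fun c =>
        ((g.getD (i*K+j) []).getD r []).getD c 0)))) := by
  rw [pvFoldl_append _ (fun i => (List.range L).map (fun r =>
      (List.range K).foldl (fun row j =>
        row ++ ((g.getD (i*K+j) []).getD r []).take L) []))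
    (fun acc i => by
      rw [pvFoldl_append _ (fun r => [(List.range K).foldl (fun row j =>
          row ++ ((g.getD (i*K+j) []).getD r []).take L) []]) (fun _ _ => rfl),
        ← List.map_eq_flatMap]),
    List.nil_append]
  apply pvFlatMap_congr
  intro i hi
  rw [List.mem_range] at hi
  apply List.map_congr_left
  intro r hr
  rw [List.mem_range] at hr
  rw [pvFoldl_append _ (fun j => ((g.getD (i*K+j) []).getD r []).take L) (fun _ _ => rfl),
    List.nil_append]
  apply pvFlatMap_congr
  intro j hj
  rw [List.mem_range] at hj
  apply pvTake_eq_map_getD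
  apply hpre (i*K+j) ?_ r hr
  have h5 : (i+1)*K ≤ K*K := Nat.mul_le_mul_right K hi
  have h6 : (i+1)*K = i*K+K := by ring
  omega

-- ===== VERDICT (by name: the statement is the Claim_ definition above) =====
theorem join_grid_spec : Claim_equal_join_grid := by
  intro g _ hpre
  unfold Spec_join_grid
  rw [join_grid_eq_fold]
  exact (pvA_eq_bigM g _ _).trans ((pvBigM_eq_T g _ _).trans
    (pvB_eq_T g _ _ (fun m hm r hr => (hpre.2 m hm).2 r hr)).symm)
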